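-- pv_equiv track=rewrite | github.com/Majed-Alsho/EAA-Embedded-Ai-Assistant- | eaa_v4/smart_edit.py | _count_all_exact
-- ===== SOURCE A (Python) =====
-- from typing import Dict, List, Optional, Tuple, Any
--
-- def _count_all_exact(
--     file_lines: List[str], search_lines: List[str]
-- ) -> int:
--     """Count all exact occurrences."""
--     count = 0
--     search_len = len(search_lines)
--     for i in range(len(file_lines) - search_len + 1):
--         if file_lines[i:i + search_len] == search_lines:
--             count += 1
--     return count
-- ===== SOURCE B (Python) =====
-- from typing import List
--
-- def _count_all_exact(
--     file_lines: List[str], search_lines: List[str]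
-- ) -> int:
--     """Count all exact (overlapping) occurrences with a KMP scan over line tokens."""
--     m = len(search_lines)
--     if m == 0:
--         return len(file_lines) + 1  # the empty block matches at every boundary
--     # fail[q] = length of the longest proper border of search_lines[:q]
--     fail = [0] * (m + 1)
--     p = 0
--     for q in range(2, m + 1):
--         while p > 0 and search_lines[q - 1] != search_lines[p]:
--             p = fail[p]
--         if search_lines[q - 1] == search_lines[p]:
--             p += 1
--         fail[q] = p
--     count = 0
--     q = 0
--     for line in file_lines:
--         while q > 0 and (q == m or search_lines[q] != line):
--             q = fail[q]
--         if q < m and search_lines[q] == line: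
--             q += 1
--         if q == m:
--             count += 1
--     return count
-- ===== Notes on version B (the rewrite author's own statement) =====
-- stated objective: alternative
-- what changed: Replaces A's per-position slice-and-compare scan by KMP matching over line tokens: a linear prefix-function (failure) table plus one left-to-right pass that counts all overlapping matches.
import Mathlib
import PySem

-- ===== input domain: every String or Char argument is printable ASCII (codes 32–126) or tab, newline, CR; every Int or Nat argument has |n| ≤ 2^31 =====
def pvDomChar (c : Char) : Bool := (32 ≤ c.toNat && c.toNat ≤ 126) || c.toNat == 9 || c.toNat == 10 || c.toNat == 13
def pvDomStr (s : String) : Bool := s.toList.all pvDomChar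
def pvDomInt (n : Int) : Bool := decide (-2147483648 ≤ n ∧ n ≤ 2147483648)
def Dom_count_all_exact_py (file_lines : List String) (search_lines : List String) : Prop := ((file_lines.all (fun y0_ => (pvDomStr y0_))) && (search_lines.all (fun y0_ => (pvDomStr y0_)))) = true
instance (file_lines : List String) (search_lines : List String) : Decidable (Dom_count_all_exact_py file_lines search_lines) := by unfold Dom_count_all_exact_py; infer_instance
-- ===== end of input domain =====

-- B replaces A's per-position slice comparison by a KMP scan (linear prefix-function
-- table, then one left-to-right pass counting overlapping matches): a genuinely
-- different algorithm with the same return value (objective: alternative).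

-- ===== PORT A =====
-- literal port of A: count = 0; for i in range(len(file_lines) - search_len + 1): if slice == search: count += 1
def count_all_exact_py (file_lines : List String) (search_lines : List String) : Int :=
  let search_len : Int := (search_lines.length : Int)
  (PySem.List.pyRange 0 ((file_lines.length : Int) - search_len + 1) 1).foldl
    (fun count i =>
      if PySem.List.slice file_lines (some i) (some (i + search_len)) = search_lines
      then count + 1 else count) 0

-- ===== PORT B =====
-- `while p > 0 and search_lines[q-1] != search_lines[p]: p = fail[p]`; fuel = current p
-- bounds the iteration count (each table entry is strictly smaller); getD is exact here
-- since Python only reads indices that are in range (p < m, q - 1 < m).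
def pvBuildStep (pat : List String) (fl : List Nat) (c : String) : Nat → Nat → Nat
  | _, 0 => 0
  | 0, p + 1 => p + 1
  | fuel + 1, p + 1 =>
    if c ≠ pat.getD (p + 1) "" then pvBuildStep pat fl c fuel (fl.getD (p + 1) 0)
    else p + 1

-- body of `for q in range(2, m + 1)`: state is (fail, p); `fail[q] = p` is a set at q,
-- in range because 2 ≤ q ≤ m < len(fail); q ≥ 0 so toNat is exact.
def pvBuildIter (pat : List String) (st : List Nat × Nat) (qi : Int) : List Nat × Nat :=
  let q := qi.toNat
  let c := pat.getD (q - 1) ""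
  let p1 := pvBuildStep pat st.1 c st.2 st.2
  let p2 := if c = pat.getD p1 "" then p1 + 1 else p1
  (st.1.set q p2, p2)

-- `while q > 0 and (q == m or search_lines[q] != line): q = fail[q]`; fuel = current q
-- bounds the iteration count; getD is exact: Python reads search_lines[q] only when q < m.
def pvShift (pat : List String) (fail : List Nat) (m : Nat) (c : String) : Nat → Nat → Nat
  | _, 0 => 0
  | 0, q + 1 => q + 1
  | fuel + 1, q + 1 =>
    if q + 1 = m ∨ pat.getD (q + 1) "" ≠ c then pvShift pat fail m c fuel (fail.getD (q + 1) 0)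
    else q + 1

-- one iteration of `for line in file_lines`
def pvStep (pat : List String) (fail : List Nat) (m : Nat) (st : Nat × Int) (c : String) : Nat × Int :=
  let q1 := pvShift pat fail m c st.1 st.1
  let q2 := if q1 < pat.length ∧ pat.getD q1 "" = c then q1 + 1 else q1
  (q2, if q2 = m then st.2 + 1 else st.2)

def count_all_exact_py_alt (file_lines : List String) (search_lines : List String) : Int :=
  let m := search_lines.length
  if m = 0 then (file_lines.length : Int) + 1
  else
    let fail := ((PySem.List.pyRange 2 ((m : Int) + 1) 1).foldl
      (pvBuildIter search_lines) (List.replicate (m + 1) 0, 0)).1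
    (file_lines.foldl (pvStep search_lines fail m) (0, 0)).2

-- ===== PRECONDITION & SPEC =====
def Spec_count_all_exact_py (file_lines : List String) (search_lines : List String) (out : Int) : Prop := out = count_all_exact_py_alt file_lines search_lines
instance (file_lines : List String) (search_lines : List String) (out : Int) : Decidable (Spec_count_all_exact_py file_lines search_lines out) := by unfold Spec_count_all_exact_py; infer_instance

-- ===== CLAIM (what is proved, stated in full; the proofs are below) =====
def Claim_equal_count_all_exact_py : Prop := ∀ (file_lines : List String) (search_lines : List String), Dom_count_all_exact_py file_lines search_lines → Spec_count_all_exact_py file_lines search_lines (count_all_exact_py file_lines search_lines)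

-- ===== LEMMAS AND PROOFS =====

-- the common specification: number of start positions whose window equals pat
def pvMatchAt (pat s : List String) (i : Nat) : Bool := decide ((s.drop i).take pat.length = pat)
def pvCnt (pat s : List String) : Nat := (List.range (s.length + 1 - pat.length)).countP (pvMatchAt pat s)

-- proof-side border function: brute-force longest proper border of pat.take q
def pvBord (pat : List String) (q : Nat) : Nat → Nat
  | 0 => 0
  | p + 1 => if pat.take (p + 1) <:+ pat.take q then p + 1 else pvBord pat q p

-- invariant of the KMP state: q is the LONGEST p ≤ m with pat.take p a suffix of the read text
def pvInv (pat s : List String) (q : Nat) : Prop :=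
  pat.take q <:+ s ∧ q ≤ pat.length ∧ ∀ p, p ≤ pat.length → pat.take p <:+ s → p ≤ q

-- the table hypothesis every loop below uses: entries 1..m hold the true border lengths
def pvGoodTable (pat : List String) (fl : List Nat) : Prop :=
  ∀ q, 0 < q → q ≤ pat.length → fl.getD q 0 = pvBord pat q (q - 1)

theorem pv_suffix_iff_drop {α : Type} (u v : List α) :
    u <:+ v ↔ v.drop (v.length - u.length) = u := by
  constructor
  · rintro ⟨t, rfl⟩
    simp
  · intro h
    exact ⟨v.take (v.length - u.length),
      by conv_rhs => rw [← List.take_append_drop (v.length - u.length) v, h]⟩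

theorem pv_suffix_of_suffix_le {α : Type} {u v w : List α} (hu : u <:+ w) (hv : v <:+ w)
    (h : u.length ≤ v.length) : u <:+ v := by
  rw [← List.reverse_prefix] at hu hv ⊢
  exact List.prefix_of_prefix_length_le hu hv (by simpa using h)

theorem pv_take_succ_getD (pat : List String) (p : Nat) (hp : p < pat.length) :
    pat.take (p + 1) = pat.take p ++ [pat.getD p ""] := by
  rw [List.take_succ, List.getD_eq_getElem pat _ hp, List.getElem?_eq_getElem hp]
  rfl

theorem pv_app_singleton_suffix {α : Type} (u s : List α) (x c : α) :
    (u ++ [x] <:+ s ++ [c]) ↔ (x = c ∧ u <:+ s) := by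
  rw [← List.reverse_prefix, ← List.reverse_prefix (l₁ := u)]
  simp [List.cons_prefix_cons]

theorem pv_suf_append_iff (pat s : List String) (c : String) (p : Nat) (hp : p ≤ pat.length) :
    (pat.take p <:+ s ++ [c]) ↔
      (p = 0 ∨ ∃ p', p = p' + 1 ∧ pat.take p' <:+ s ∧ pat.getD p' "" = c) := by
  cases p with
  | zero => simp
  | succ p' =>
    have hp' : p' < pat.length := hp
    rw [pv_take_succ_getD pat p' hp', pv_app_singleton_suffix]
    constructor
    · rintro ⟨hxc, hsuf⟩
      exact Or.inr ⟨p', rfl, hsuf, hxc⟩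
    · rintro (h0 | ⟨p'', heq, hsuf, hxc⟩)
      · exact absurd h0 (Nat.succ_ne_zero p')
      · obtain rfl : p' = p'' := by omega
        exact ⟨hxc, hsuf⟩

theorem pv_bord_correct (pat : List String) (q : Nat) :
    ∀ p0, p0 < q →
      pvBord pat q p0 ≤ p0 ∧ pat.take (pvBord pat q p0) <:+ pat.take q ∧
      ∀ p, p ≤ p0 → pat.take p <:+ pat.take q → p ≤ pvBord pat q p0 := by
  intro p0
  induction p0 with
  | zero =>
    intro _
    refine ⟨le_refl 0, by simp [pvBord], ?_⟩
    intro p hp _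
    simpa [pvBord] using hp
  | succ p ih =>
    intro hlt
    simp only [pvBord]
    split_ifs with hsfx
    · exact ⟨le_refl _, hsfx, fun p' hp' _ => hp'⟩
    · obtain ⟨h1, h2, h3⟩ := ih (by omega)
      refine ⟨by omega, h2, ?_⟩
      intro p' hp' hsuf
      rcases Nat.lt_or_ge p' (p + 1) with h | h
      · exact h3 p' (by omega) hsuf
      · exfalso
        have hpe : p' = p + 1 := by omega
        subst hpe
        exact hsfx hsuf

-- the scan's while loop descends the border chain: its result is again a suffix state,
-- it is extendable (or zero), and it is maximal among extendable suffix states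
theorem pv_shift_correct (pat : List String) (fl : List Nat) (c : String) (s : List String)
    (hfl : pvGoodTable pat fl) :
    ∀ fuel q, q ≤ fuel → q ≤ pat.length → pat.take q <:+ s →
      (pat.take (pvShift pat fl pat.length c fuel q) <:+ s) ∧
      pvShift pat fl pat.length c fuel q ≤ pat.length ∧
      (pvShift pat fl pat.length c fuel q = 0 ∨
        (pvShift pat fl pat.length c fuel q < pat.length ∧
         pat.getD (pvShift pat fl pat.length c fuel q) "" = c)) ∧
      ∀ p, p ≤ q → pat.take p <:+ s → p < pat.length → pat.getD p "" = c →
        p ≤ pvShift pat fl pat.length c fuel q := by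
  intro fuel
  induction fuel with
  | zero =>
    intro q hqf hqm hsuf
    obtain rfl : q = 0 := by omega
    refine ⟨by simp [pvShift], by simp [pvShift], Or.inl (by simp [pvShift]), ?_⟩
    intro p hp _ _ _
    simpa [pvShift] using hp
  | succ fuel ih =>
    intro q hqf hqm hsuf
    cases q with
    | zero =>
      refine ⟨by simp [pvShift], by simp [pvShift], Or.inl (by simp [pvShift]), ?_⟩
      intro p hp _ _ _
      simpa [pvShift] using hp
    | succ q' =>
      by_cases hcond : q' + 1 = pat.length ∨ pat.getD (q' + 1) "" ≠ c
      · simp only [pvShift, if_pos hcond]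
        have hfg : fl.getD (q' + 1) 0 = pvBord pat (q' + 1) q' := by
          simpa using hfl (q' + 1) (by omega) hqm
        obtain ⟨hf1, hf2, hf3⟩ := pv_bord_correct pat (q' + 1) q' (by omega)
        have ihh := ih (fl.getD (q' + 1) 0)
          (by rw [hfg]; omega) (by rw [hfg]; omega)
          (by rw [hfg]; exact hf2.trans hsuf)
        refine ⟨ihh.1, ihh.2.1, ihh.2.2.1, ?_⟩
        intro p hple hpsuf hplen hpc
        have hpq' : p ≤ q' := by
          rcases Nat.lt_or_ge p (q' + 1) with h | h
          · omega
          · exfalso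
            have hpe : p = q' + 1 := by omega
            subst hpe
            rcases hcond with h1 | h1
            · omega
            · exact h1 hpc
        have hps : pat.take p <:+ pat.take (q' + 1) :=
          pv_suffix_of_suffix_le hpsuf hsuf (by simp [List.length_take]; omega)
        exact ihh.2.2.2 p (by rw [hfg]; exact hf3 p hpq' hps) hpsuf hplen hpc
      · simp only [pvShift, if_neg hcond]
        push_neg at hcond
        exact ⟨hsuf, hqm, Or.inr ⟨by omega, hcond.2⟩, fun p hp _ _ _ => hp⟩

-- the table builder's while loop: the same descent, inside the pattern itself
theorem pv_build_descent (pat : List String) (fl : List Nat) (c : String) (q : Nat)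
    (hfl : ∀ q', 0 < q' → q' ≤ q → fl.getD q' 0 = pvBord pat q' (q' - 1)) :
    ∀ fuel p, p ≤ fuel → p < q → pat.take p <:+ pat.take q →
      (pat.take (pvBuildStep pat fl c fuel p) <:+ pat.take q) ∧
      pvBuildStep pat fl c fuel p < q ∧
      (pvBuildStep pat fl c fuel p = 0 ∨ pat.getD (pvBuildStep pat fl c fuel p) "" = c) ∧
      ∀ p', p' ≤ p → pat.take p' <:+ pat.take q → pat.getD p' "" = c →
        p' ≤ pvBuildStep pat fl c fuel p := by
  intro fuel
  induction fuel with
  | zero =>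
    intro p hpf hpq hsuf
    obtain rfl : p = 0 := by omega
    refine ⟨by simp [pvBuildStep], by simpa [pvBuildStep] using hpq,
      Or.inl (by simp [pvBuildStep]), ?_⟩
    intro p' hp' _ _
    simpa [pvBuildStep] using hp'
  | succ fuel ih =>
    intro p hpf hpq hsuf
    cases p with
    | zero =>
      refine ⟨by simp [pvBuildStep], by simpa [pvBuildStep] using hpq,
        Or.inl (by simp [pvBuildStep]), ?_⟩
      intro p' hp' _ _
      simpa [pvBuildStep] using hp'
    | succ v =>
      by_cases hcond : c ≠ pat.getD (v + 1) ""
      · simp only [pvBuildStep, if_pos hcond]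
        have hfg : fl.getD (v + 1) 0 = pvBord pat (v + 1) v := by
          simpa using hfl (v + 1) (by omega) (by omega)
        obtain ⟨hf1, hf2, hf3⟩ := pv_bord_correct pat (v + 1) v (by omega)
        have ihh := ih (fl.getD (v + 1) 0)
          (by rw [hfg]; omega) (by rw [hfg]; omega)
          (by rw [hfg]; exact hf2.trans hsuf)
        refine ⟨ihh.1, ihh.2.1, ihh.2.2.1, ?_⟩
        intro p' hple hpsuf hpc
        have hpv : p' ≤ v := by
          rcases Nat.lt_or_ge p' (v + 1) with h | h
          · omega
          · exfalso
            have hpe : p' = v + 1 := by omega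
            subst hpe
            exact hcond hpc.symm
        have hps : pat.take p' <:+ pat.take (v + 1) :=
          pv_suffix_of_suffix_le hpsuf hsuf (by simp [List.length_take]; omega)
        exact ihh.2.2.2 p' (by rw [hfg]; exact hf3 p' hpv hps) hpsuf hpc
      · simp only [pvBuildStep, if_neg hcond]
        exact ⟨hsuf, hpq, Or.inr (not_ne_iff.mp hcond).symm, fun p' hp' _ _ => hp'⟩

-- one builder iteration turns the border of pat.take q into the border of pat.take (q+1)
theorem pv_build_iter_correct (pat : List String) (fl : List Nat) (q : Nat)
    (hq1 : 1 ≤ q) (hq : q + 1 ≤ pat.length)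
    (hfl : ∀ q', 0 < q' → q' ≤ q → fl.getD q' 0 = pvBord pat q' (q' - 1)) :
    (if pat.getD q "" = pat.getD (pvBuildStep pat fl (pat.getD q "") (pvBord pat q (q - 1)) (pvBord pat q (q - 1))) "" then pvBuildStep pat fl (pat.getD q "") (pvBord pat q (q - 1)) (pvBord pat q (q - 1)) + 1 else pvBuildStep pat fl (pat.getD q "") (pvBord pat q (q - 1)) (pvBord pat q (q - 1))) = pvBord pat (q + 1) q := by
  set c := pat.getD q "" with hc
  obtain ⟨hb1, hb2, hb3⟩ := pv_bord_correct pat q (q - 1) (by omega)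
  obtain ⟨hr1, hr2, hr3, hr4⟩ := pv_build_descent pat fl c q hfl (pvBord pat q (q - 1))
    (pvBord pat q (q - 1)) le_rfl (by omega) hb2
  set r := pvBuildStep pat fl c (pvBord pat q (q - 1)) (pvBord pat q (q - 1)) with hr
  obtain ⟨hn1, hn2, hn3⟩ := pv_bord_correct pat (q + 1) q (by omega)
  have htq : pat.take (q + 1) = pat.take q ++ [c] := pv_take_succ_getD pat q (by omega)
  -- maximality of the computed value among borders of pat.take (q+1)
  have hmax : ∀ p', p' ≤ q → pat.take p' <:+ pat.take (q + 1) →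
      p' ≤ (if c = pat.getD r "" then r + 1 else r) := by
    intro p' hp'q hp'suf
    rw [htq] at hp'suf
    rcases (pv_suf_append_iff pat (pat.take q) c p' (by omega)).mp hp'suf with
      rfl | ⟨p'', rfl, hp''s, hp''c⟩
    · omega
    · have hp''b : p'' ≤ pvBord pat q (q - 1) := hb3 p'' (by omega) hp''s
      have hp''r : p'' ≤ r := hr4 p'' hp''b hp''s hp''c
      by_cases hext : c = pat.getD r ""
      · simp only [if_pos hext]; omega
      · exfalso
        have hr0 : r = 0 := by
          rcases hr3 with h | h
          · exact h
          · exact absurd h.symm hext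
        have : p'' = 0 := by omega
        subst this
        rw [hr0] at hext
        exact hext hp''c.symm
  -- the computed value is itself a border of pat.take (q+1)
  have hval : pat.take (if c = pat.getD r "" then r + 1 else r) <:+ pat.take (q + 1) := by
    by_cases hext : c = pat.getD r ""
    · simp only [if_pos hext]
      rw [pv_take_succ_getD pat r (by omega), htq, ← hext]
      exact (pv_app_singleton_suffix _ _ _ _).mpr ⟨rfl, hr1⟩
    · simp only [if_neg hext]
      have hr0 : r = 0 := by
        rcases hr3 with h | h
        · exact h
        · exact absurd h.symm hext
      rw [hr0]
      simp
  have hle1 : (if c = pat.getD r "" then r + 1 else r) ≤ pvBord pat (q + 1) q := by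
    apply hn3
    · split_ifs <;> omega
    · exact hval
  have hle2 : pvBord pat (q + 1) q ≤ (if c = pat.getD r "" then r + 1 else r) :=
    hmax (pvBord pat (q + 1) q) (by omega) hn2
  omega

-- getD through a set inside the table (index in range)
theorem pv_getD_set (fl : List Nat) (i j : Nat) (a : Nat) (hi : i < fl.length) :
    (fl.set i a).getD j 0 = if i = j then a else fl.getD j 0 := by
  rw [List.getD_eq_getElem?_getD, List.getD_eq_getElem?_getD, List.getElem?_set]
  split_ifs with h
  · simp
  · rfl

-- invariant of the table-building fold: after processing range(2, q+1) the state is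
-- (a table correct at 1..q of unchanged length, the border of pat.take q)
theorem pv_build_fold (pat : List String) :
    ∀ (k q : Nat), 1 ≤ q → q ≤ pat.length → q = 1 + k →
      (((PySem.List.pyRange 2 ((q : Int) + 1) 1).foldl (pvBuildIter pat)
          (List.replicate (pat.length + 1) 0, 0)).1.length = pat.length + 1) ∧
      (((PySem.List.pyRange 2 ((q : Int) + 1) 1).foldl (pvBuildIter pat)
          (List.replicate (pat.length + 1) 0, 0)).2 = pvBord pat q (q - 1)) ∧
      ∀ q', 0 < q' → q' ≤ q →
        (((PySem.List.pyRange 2 ((q : Int) + 1) 1).foldl (pvBuildIter pat)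
          (List.replicate (pat.length + 1) 0, 0)).1.getD q' 0 = pvBord pat q' (q' - 1)) := by
  intro k
  induction k with
  | zero =>
    intro q hq1 hqm hqk
    obtain rfl : q = 1 := by omega
    rw [show ((1 : Nat) : Int) + 1 = 2 by norm_num, PySem.List.pyRange_one_eq_nil (by norm_num)]
    refine ⟨by simp, by simp [pvBord], ?_⟩
    intro q' h1 h2
    obtain rfl : q' = 1 := by omega
    simp [List.getD_eq_getElem?_getD, pvBord, show 1 < pat.length + 1 by omega]
  | succ k ih =>
    intro q hq1 hqm hqk
    obtain rfl : q = k + 2 := by omega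
    have ihh := ih (k + 1) (by omega) (by omega) (by omega)
    have hsplit : PySem.List.pyRange 2 (((k + 2 : Nat) : Int) + 1) 1 =
        PySem.List.pyRange 2 ((k + 2 : Nat) : Int) 1 ++ [((k + 2 : Nat) : Int)] :=
      PySem.List.pyRange_one_succ_right (by push_cast; omega)
    have hpre : PySem.List.pyRange 2 ((k + 2 : Nat) : Int) 1 =
        PySem.List.pyRange 2 (((k + 1 : Nat) : Int) + 1) 1 := by
      rw [show ((k + 2 : Nat) : Int) = ((k + 1 : Nat) : Int) + 1 by push_cast; ring]
    rw [hsplit, hpre, List.foldl_append]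
    set st := (PySem.List.pyRange 2 (((k + 1 : Nat) : Int) + 1) 1).foldl (pvBuildIter pat)
      (List.replicate (pat.length + 1) 0, 0) with hst
    obtain ⟨ihlen, ihsnd, ihtab⟩ := ihh
    have key := pv_build_iter_correct pat st.1 (k + 1) (by omega) (by omega)
      (fun q' h1 h2 => ihtab q' h1 h2)
    simp only [Nat.add_sub_cancel] at key
    have ihsnd' : st.2 = pvBord pat (k + 1) k := by simpa using ihsnd
    simp only [List.foldl_cons, List.foldl_nil, pvBuildIter, Int.toNat_natCast,
      show k + 2 - 1 = k + 1 from rfl]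
    rw [ihsnd']
    rw [key]
    refine ⟨by simpa using ihlen, rfl, ?_⟩
    intro q' h1 h2
    rw [pv_getD_set st.1 (k + 2) q' _ (by omega)]
    split_ifs with h
    · rw [← h]; rfl
    · exact ihtab q' h1 (by omega)

theorem pv_cnt_append (pat s : List String) (c : String) (hm : 0 < pat.length) :
    pvCnt pat (s ++ [c]) = pvCnt pat s + (if pat <:+ s ++ [c] then 1 else 0) := by
  by_cases hnm : pat.length ≤ s.length + 1
  · have h1 : (s ++ [c]).length + 1 - pat.length = (s.length + 1 - pat.length) + 1 := by
      simp; omega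
    unfold pvCnt
    rw [h1, List.range_succ, List.countP_append]
    have hcong : (List.range (s.length + 1 - pat.length)).countP (pvMatchAt pat (s ++ [c])) =
        (List.range (s.length + 1 - pat.length)).countP (pvMatchAt pat s) := by
      apply List.countP_congr
      intro i hi
      have hi' : i < s.length + 1 - pat.length := List.mem_range.mp hi
      unfold pvMatchAt
      rw [List.drop_append_of_le_length (by omega),
        List.take_append_of_le_length (by simp [List.length_drop]; omega)]
    rw [hcong, List.countP_singleton]
    have hlast : pvMatchAt pat (s ++ [c]) (s.length + 1 - pat.length) = true ↔
        pat <:+ s ++ [c] := by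
      unfold pvMatchAt
      have hlen2 : ((s ++ [c]).drop (s.length + 1 - pat.length)).length = pat.length := by
        simp; omega
      rw [List.take_of_length_le (le_of_eq hlen2)]
      rw [pv_suffix_iff_drop]
      simp
    by_cases hsfx : pat <:+ s ++ [c]
    · simp [hlast.mpr hsfx, hsfx]
    · have : pvMatchAt pat (s ++ [c]) (s.length + 1 - pat.length) = false := by
        rw [Bool.eq_false_iff]; intro h; exact hsfx (hlast.mp h)
      simp [this, hsfx]
  · have hnot : ¬ (pat <:+ s ++ [c]) := by
      intro h
      have := h.length_le
      simp at this
      omega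
    unfold pvCnt
    simp only [List.length_append, List.length_singleton]
    rw [show s.length + 1 + 1 - pat.length = 0 by omega,
      show s.length + 1 - pat.length = 0 by omega]
    simp [hnot]

theorem pv_step_correct (pat s : List String) (fl : List Nat) (c : String) (q : Nat) (count : Int)
    (hm : 0 < pat.length) (hfl : pvGoodTable pat fl)
    (hInv : pvInv pat s q) (hc : count = (pvCnt pat s : Int)) :
    pvInv pat (s ++ [c]) (pvStep pat fl pat.length (q, count) c).1 ∧
    (pvStep pat fl pat.length (q, count) c).2 = (pvCnt pat (s ++ [c]) : Int) := by
  obtain ⟨hsuf, hqm, hmaxS⟩ := hInv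
  obtain ⟨h1suf, h1le, h1alt, h1max⟩ :=
    pv_shift_correct pat fl c s hfl q q le_rfl hqm hsuf
  unfold pvStep
  simp only
  by_cases hext : pvShift pat fl pat.length c q q < pat.length ∧
      pat.getD (pvShift pat fl pat.length c q q) "" = c
  · rw [if_pos hext]
    set q1 := pvShift pat fl pat.length c q q with hq1def
    have hq2suf : pat.take (q1 + 1) <:+ s ++ [c] := by
      rw [pv_take_succ_getD pat q1 hext.1, hext.2]
      exact (pv_app_singleton_suffix _ _ _ _).mpr ⟨rfl, h1suf⟩
    have hmaxN : ∀ p, p ≤ pat.length → pat.take p <:+ s ++ [c] → p ≤ q1 + 1 := by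
      intro p hpm hpsuf
      rcases (pv_suf_append_iff pat s c p hpm).mp hpsuf with rfl | ⟨p', rfl, hp's, hp'c⟩
      · omega
      · have := h1max p' (hmaxS p' (by omega) hp's) hp's (by omega) hp'c
        omega
    refine ⟨⟨hq2suf, by omega, hmaxN⟩, ?_⟩
    have hiff : (q1 + 1 = pat.length) ↔ pat <:+ s ++ [c] := by
      constructor
      · intro h
        have := hq2suf
        rw [h, List.take_length] at this
        exact this
      · intro h
        have h2 : pat.take pat.length <:+ s ++ [c] := by rw [List.take_length]; exact h
        have := hmaxN pat.length le_rfl h2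
        omega
    rw [pv_cnt_append pat s c hm, hc]
    by_cases hq2m : q1 + 1 = pat.length
    · simp [hq2m, hiff.mp hq2m]
    · have : ¬ (pat <:+ s ++ [c]) := fun h => hq2m (hiff.mpr h)
      simp [hq2m, this]
  · rw [if_neg hext]
    have hq10 : pvShift pat fl pat.length c q q = 0 := by
      rcases h1alt with h | h
      · exact h
      · exact absurd h hext
    rw [hq10]
    rw [hq10] at hext
    have hnomatch : ∀ p', pat.take p' <:+ s → p' < pat.length → pat.getD p' "" = c → False := by
      intro p' h2 h3 h4
      have := h1max p' (hmaxS p' (le_of_lt h3) h2) h2 h3 h4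
      rw [hq10] at this
      have hp0 : p' = 0 := by omega
      subst hp0
      exact hext ⟨h3, h4⟩
    have hmaxN : ∀ p, p ≤ pat.length → pat.take p <:+ s ++ [c] → p ≤ 0 := by
      intro p hpm hpsuf
      rcases (pv_suf_append_iff pat s c p hpm).mp hpsuf with rfl | ⟨p', rfl, hp's, hp'c⟩
      · omega
      · exact absurd (hnomatch p' hp's (by omega) hp'c) not_false
    have hnot : ¬ (pat <:+ s ++ [c]) := by
      intro h
      have h2 : pat.take pat.length <:+ s ++ [c] := by rw [List.take_length]; exact h
      have := hmaxN pat.length le_rfl h2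
      omega
    refine ⟨⟨by simp, by omega, hmaxN⟩, ?_⟩
    rw [pv_cnt_append pat s c hm, hc, if_neg (show ¬ (0 = pat.length) by omega)]
    simp [hnot]

theorem pv_fold_correct (pat : List String) (fl : List Nat)
    (hm : 0 < pat.length) (hfl : pvGoodTable pat fl) :
    ∀ (t s : List String) (q : Nat) (count : Int), pvInv pat s q → count = (pvCnt pat s : Int) →
      ((t.foldl (pvStep pat fl pat.length) (q, count)).2 = (pvCnt pat (s ++ t) : Int)) := by
  intro t
  induction t with
  | nil => intro s q count hInv hc; simpa using hc
  | cons c t ih =>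
    intro s q count hInv hc
    have h := pv_step_correct pat s fl c q count hm hfl hInv hc
    have := ih (s ++ [c])
      (pvStep pat fl pat.length (q, count) c).1
      (pvStep pat fl pat.length (q, count) c).2 h.1 h.2
    simpa [List.append_assoc] using this

theorem pv_alt_eq_cnt (f p : List String) : count_all_exact_py_alt f p = (pvCnt p f : Int) := by
  unfold count_all_exact_py_alt
  by_cases hm : p.length = 0
  · rw [if_pos hm]
    obtain rfl : p = [] := List.length_eq_zero_iff.mp hm
    unfold pvCnt pvMatchAt
    simp
  · rw [if_neg hm]
    have hm' : 0 < p.length := Nat.pos_of_ne_zero hm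
    have hbuild := pv_build_fold p (p.length - 1) p.length hm' le_rfl (by omega)
    have hfl : pvGoodTable p (((PySem.List.pyRange 2 ((p.length : Int) + 1) 1).foldl
        (pvBuildIter p) (List.replicate (p.length + 1) 0, 0)).1) := by
      intro q h1 h2
      exact hbuild.2.2 q h1 h2
    have hInv0 : pvInv p [] 0 := by
      refine ⟨by simp, by omega, ?_⟩
      intro p' hp' hsuf
      have h0 := List.suffix_nil.mp hsuf
      have hlen : (p.take p').length = 0 := by rw [h0]; rfl
      rw [List.length_take] at hlen
      omega
    have hc0 : (0 : Int) = (pvCnt p [] : Int) := by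
      unfold pvCnt
      simp [Nat.sub_eq_zero_of_le hm']
    simpa using pv_fold_correct p _ hm' hfl f [] 0 0 hInv0 hc0

theorem pv_a_eq_cnt (f p : List String) : count_all_exact_py f p = (pvCnt p f : Int) := by
  unfold count_all_exact_py
  simp only
  rw [PySem.List.pyRange_one]
  rw [List.foldl_map]
  have hK : (((f.length : Int) - (p.length : Int) + 1) - 0).toNat = f.length + 1 - p.length := by
    omega
  rw [hK]
  have hfun : ∀ (count : Int) (k : Nat),
      (if PySem.List.slice f (some ((0 : Int) + (k : Nat)))
          (some ((0 : Int) + (k : Nat) + (p.length : Int))) = p then count + 1 else count) =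
      (if pvMatchAt p f k then count + 1 else count) := by
    intro count k
    have e : (0 : Int) + (k : Nat) = ((k : Nat) : Int) := by ring
    rw [e, PySem.List.slice_natCast_add]
    unfold pvMatchAt
    by_cases h : (f.drop k).take p.length = p
    · simp [h]
    · simp [h]
  calc (List.range (f.length + 1 - p.length)).foldl
        (fun count k => if PySem.List.slice f (some ((0 : Int) + (k : Nat)))
          (some ((0 : Int) + (k : Nat) + (p.length : Int))) = p then count + 1 else count) 0
      = (List.range (f.length + 1 - p.length)).foldl
        (fun count k => if pvMatchAt p f k then count + 1 else count) 0 := by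
        congr 1
        funext acc k
        exact hfun acc k
    _ = (pvCnt p f : Int) := by
        rw [PySem.List.foldl_count_if (pvMatchAt p f) (List.range (f.length + 1 - p.length)) 0]
        unfold pvCnt
        simp

-- ===== VERDICT (by name: the statement is the Claim_ definition above) =====
theorem count_all_exact_py_spec : Claim_equal_count_all_exact_py := by
  intro f p _
  unfold Spec_count_all_exact_py
  rw [pv_a_eq_cnt, pv_alt_eq_cnt]
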